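-- pv_equiv track=rewrite | github.com/DelfinSR/Ascon-TFG | analisis/util.py | check_if_is_invariant
-- ===== SOURCE A (Python) =====
-- sbox_array = [0x4,0xb,0x1f,0x14,0x1a,0x15,0x9,0x2,0x1b,0x5,0x8,0x12,0x1d,0x3,0x6,0x1c,0x1e,0x13,0x7,0xe,0x0,0xd,0x11,0x18,0x10,0xc,0x1,0x19,0x16,0xa,0xf,0x17]
--
-- def get_results_of_AFN(AFN_func):
--     res = []
--     for x_i in range(32):
--         x_bits = [int(x) for x in '{0:05b}'.format(x_i)]
--
--         xor_result = 0
--         xu = []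
--         for f in AFN_func:
--             if f == [0,0,0,0,0]:
--                 xor_result = 1
--                 continue
--             xu.append(calculate_power_u(x_bits, f))
--
--         result = 0
--         for _,x in enumerate(xu):
--             r = 1
--             for y in x:
--                 r &= y
--             result ^= r
--
--         res.append(result ^ xor_result)
--     return res
--
-- def get_results_of_AFN_input_sbox(AFN_func):
--     res = []
--     for x_i in range(32):
--         x_bits = [int(x) for x in '{0:05b}'.format(sbox_array[x_i])]
--
--         xor_result = 0
--         xu = []
--         for f in AFN_func:
--             if f == [0,0,0,0,0]:
--                 xor_result = 1
--                 continue
--             xu.append(calculate_power_u(x_bits, f))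
--
--         result = 0
--         for _,x in enumerate(xu):
--             r = 1
--             for y in x:
--                 r &= y
--             result ^= r
--         res.append(result ^ xor_result)
--     return res
--
-- def check_if_is_invariant(AFN_func):
--     AFN_normal_result = get_results_of_AFN(AFN_func)
--     AFN_sbox_result = get_results_of_AFN_input_sbox(AFN_func)
--
--     last_result=-1
--     passed=True
--     for x in range(32):
--         calc = AFN_normal_result[x] ^ AFN_sbox_result[x]
--         if last_result == -1:
--             last_result = calc
--         else:
--             if last_result != calc:
--                 passed = False
--                 break
--     return passed
--
-- def calculate_power_u(i_bits, bits):
--     res = []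
--     for index, x in enumerate(bits):
--         if x:
--             res.append(i_bits[index])
--
--     if res == []:
--         return [0]
--     return res
-- ===== SOURCE B (Python) =====
-- sbox_array = [0x4,0xb,0x1f,0x14,0x1a,0x15,0x9,0x2,0x1b,0x5,0x8,0x12,0x1d,0x3,0x6,0x1c,0x1e,0x13,0x7,0xe,0x0,0xd,0x11,0x18,0x10,0xc,0x1,0x19,0x16,0xa,0xf,0x17]
--
-- def check_if_is_invariant(AFN_func):
--     # Truth-table-as-bitmask algorithm: build one 32-bit integer whose bit x is the AFN's
--     # value at input x (monomials processed in an outer loop over AFN_func, each contributing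
--     # a precomputed AND-mask), permute its bits through the sbox, and test that the XOR of
--     # the two tables is all-zeros or all-ones (i.e. the per-input XOR is constant).
--     FULL = (1 << 32) - 1
--     # bitmask[j]: bit x is bit j of the 5-bit big-endian representation of x
--     bitmask = [sum(((x >> (4 - j)) & 1) << x for x in range(32)) for j in range(5)]
--     table = 0
--     for f in AFN_func:
--         if f == [0, 0, 0, 0, 0]:
--             table ^= FULL
--         else:
--             idxs = [j for j, c in enumerate(f) if c]
--             if idxs:
--                 m = FULL
--                 for j in idxs:
--                     m &= bitmask[j]
--                 table ^= m
--     perm = 0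
--     for x, sx in enumerate(sbox_array):
--         perm |= ((table >> sx) & 1) << x
--     diff = table ^ perm
--     return diff == 0 or diff == FULL
-- ===== Notes on version B (the rewrite author's own statement) =====
-- stated objective: alternative
-- what changed: A evaluates the AFN pointwise (two 32-entry per-input evaluation passes over the monomial list plus a sentinel comparison loop); B builds one 32-bit truth-table integer in a monomial-outer loop from precomputed per-variable AND-masks, permutes its bits through the sbox with shifts/ors, and tests that the XOR of the two tables is all-zeros or all-ones.
import Mathlib
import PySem

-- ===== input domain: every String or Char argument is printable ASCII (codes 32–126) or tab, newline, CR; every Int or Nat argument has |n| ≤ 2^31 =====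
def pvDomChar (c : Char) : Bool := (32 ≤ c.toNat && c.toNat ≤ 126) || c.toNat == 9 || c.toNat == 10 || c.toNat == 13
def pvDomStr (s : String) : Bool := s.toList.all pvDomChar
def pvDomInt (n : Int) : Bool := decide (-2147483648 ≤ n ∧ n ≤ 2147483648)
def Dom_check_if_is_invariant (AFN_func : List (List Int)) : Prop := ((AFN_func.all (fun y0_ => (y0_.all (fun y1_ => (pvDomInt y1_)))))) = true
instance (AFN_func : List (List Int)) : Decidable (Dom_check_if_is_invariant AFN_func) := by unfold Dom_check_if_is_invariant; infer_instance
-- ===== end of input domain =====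

-- B replaces A's pointwise scheme (two 32-entry per-input evaluation passes plus a sentinel
-- comparison loop) by a truth-table-as-bitmask algorithm: one 32-bit integer truth table built
-- monomial-by-monomial from precomputed AND-masks, a bitwise sbox permutation of that table,
-- and a final test that their XOR is all-zeros or all-ones (objective: alternative).

-- ===== PORT A =====
-- module constant sbox_array (shared context of both Python versions)
def sbox_array : List Int :=
  [0x4,0xb,0x1f,0x14,0x1a,0x15,0x9,0x2,0x1b,0x5,0x8,0x12,0x1d,0x3,0x6,0x1c,
   0x1e,0x13,0x7,0xe,0x0,0xd,0x11,0x18,0x10,0xc,0x1,0x19,0x16,0xa,0xf,0x17]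

-- port of "[int(x) for x in '{0:05b}'.format(n)]"; exact for 0 ≤ n < 32, the only arguments used
def formatBits5 (n : Int) : List Int :=
  [PySem.Int.mod (PySem.Int.floordiv n 16) 2, PySem.Int.mod (PySem.Int.floordiv n 8) 2,
   PySem.Int.mod (PySem.Int.floordiv n 4) 2, PySem.Int.mod (PySem.Int.floordiv n 2) 2,
   PySem.Int.mod n 2]

-- i_bits[index] raises IndexError when index ≥ len(i_bits); those inputs are excluded by Pre_,
-- the total port defaults to 0 there
def calculate_power_u (i_bits : List Int) (bits : List Int) : List Int :=
  let res := (PySem.List.enumerate bits).foldl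
    (fun res ix => if ix.2 ≠ 0 then res ++ [PySem.List.pyGetD i_bits ix.1 0] else res) []
  if res = [] then [0] else res

-- the shared per-x body of A's two helpers (identical lines in both Python helpers)
def afnRowA (AFN_func : List (List Int)) (x_bits : List Int) : Int :=
  let p := AFN_func.foldl
    (fun (st : Int × List (List Int)) f =>
      if f = [0,0,0,0,0] then (1, st.2)
      else (st.1, st.2 ++ [calculate_power_u x_bits f])) (0, [])
  let result := p.2.foldl
    (fun result x => PySem.Int.bxor result (x.foldl (fun r y => PySem.Int.band r y) 1)) 0
  PySem.Int.bxor result p.1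

def get_results_of_AFN (AFN_func : List (List Int)) : List Int :=
  (PySem.List.pyRange 0 32).foldl
    (fun res x_i => res ++ [afnRowA AFN_func (formatBits5 x_i)]) []

def get_results_of_AFN_input_sbox (AFN_func : List (List Int)) : List Int :=
  (PySem.List.pyRange 0 32).foldl
    (fun res x_i => res ++ [afnRowA AFN_func (formatBits5 (PySem.List.pyGetD sbox_array x_i 0))]) []

-- the sentinel comparison loop, with 'break' as early return
def checkLoopA (nrm sbx : List Int) : List Int → Int → Bool
  | [], _ => true
  | x :: rest, last =>
    let calcV := PySem.Int.bxor (PySem.List.pyGetD nrm x 0) (PySem.List.pyGetD sbx x 0)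
    if last = -1 then checkLoopA nrm sbx rest calcV
    else if last ≠ calcV then false
    else checkLoopA nrm sbx rest last

def check_if_is_invariant (AFN_func : List (List Int)) : Bool :=
  let nrm := get_results_of_AFN AFN_func
  let sbx := get_results_of_AFN_input_sbox AFN_func
  checkLoopA nrm sbx (PySem.List.pyRange 0 32) (-1)

-- ===== PORT B =====
-- FULL = (1 << 32) - 1
def FULLB : Int := (1 <<< 32) - 1

-- bitmask = [sum(((x >> (4 - j)) & 1) << x for x in range(32)) for j in range(5)]
def bitmaskB : List Int :=
  (PySem.List.pyRange 0 5).map (fun j =>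
    ((PySem.List.pyRange 0 32).map (fun x =>
      (PySem.Int.band (x >>> (4 - j).toNat) 1) <<< x.toNat)).sum)

-- idxs = [j for j, c in enumerate(f) if c]
def idxsOf (f : List Int) : List Int :=
  ((PySem.List.enumerate f).filter (fun jc => decide (jc.2 ≠ 0))).map Prod.fst

-- the monomial-outer loop building the 32-bit truth table; bitmask[j] raises IndexError for
-- j ≥ 5 (inputs excluded by Pre_), the total port defaults that lookup to 0
def tableB (AFN_func : List (List Int)) : Int :=
  AFN_func.foldl
    (fun table f =>
      if f = [0,0,0,0,0] then PySem.Int.bxor table FULLB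
      else
        let idxs := idxsOf f
        if idxs ≠ [] then
          PySem.Int.bxor table
            (idxs.foldl (fun m j => PySem.Int.band m (PySem.List.pyGetD bitmaskB j 0)) FULLB)
        else table)
    0

-- perm |= ((table >> sx) & 1) << x  over enumerate(sbox_array)
def permB (table : Int) : Int :=
  (PySem.List.enumerate sbox_array).foldl
    (fun perm xsx =>
      PySem.Int.bor perm
        (Int.shiftLeft (PySem.Int.band (Int.shiftRight table xsx.2.toNat) 1) xsx.1.toNat))
    0

def check_if_is_invariant_alt (AFN_func : List (List Int)) : Bool :=
  let table := tableB AFN_func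
  let perm := permB table
  let diff := PySem.Int.bxor table perm
  decide (diff = 0 ∨ diff = FULLB)

-- ===== PRECONDITION & SPEC =====
-- Pre_ excludes inputs where some row has a nonzero coefficient at index ≥ 5: there A's
-- calculate_power_u evaluates i_bits[index] on the 5-element bit list and raises IndexError
-- (B's bitmask[j] raises there too). Both total ports default that lookup to 0, and they agree
-- even there, so the equivalence proof does not need the Pre_ hypothesis; Pre_ records
-- exactly where the Pythons return.
def Pre_check_if_is_invariant (AFN_func : List (List Int)) : Prop :=
  ∀ f ∈ AFN_func, ∀ y ∈ f.drop 5, y = 0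
instance (AFN_func : List (List Int)) : Decidable (Pre_check_if_is_invariant AFN_func) := by
  unfold Pre_check_if_is_invariant; infer_instance

def pvWitness_check_if_is_invariant : List (List Int) := [[1,0,0,0,0],[0,0,0,0,0],[1,1,0,1,0]]

def Spec_check_if_is_invariant (AFN_func : List (List Int)) (out : Bool) : Prop := out = check_if_is_invariant_alt AFN_func
instance (AFN_func : List (List Int)) (out : Bool) : Decidable (Spec_check_if_is_invariant AFN_func out) := by unfold Spec_check_if_is_invariant; infer_instance

-- ===== CLAIM (what is proved, stated in full; the proofs are below) =====
def Claim_equal_check_if_is_invariant : Prop := ∀ (AFN_func : List (List Int)), Dom_check_if_is_invariant AFN_func → Pre_check_if_is_invariant AFN_func → Spec_check_if_is_invariant AFN_func (check_if_is_invariant AFN_func)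


-- ===== LEMMAS AND PROOFS =====

def Z01 (a : Int) : Prop := a = 0 ∨ a = 1

def contribA (x f : List Int) : Int :=
  (calculate_power_u x f).foldl (fun r y => PySem.Int.band r y) 1

def gA (x f : List Int) : Int := if f = [0,0,0,0,0] then 0 else contribA x f

def Tg (g : List Int → Int) (F : List (List Int)) : Int :=
  F.foldl (fun acc f => PySem.Int.bxor acc (g f)) 0

def flagF (F : List (List Int)) : Int := if [0,0,0,0,0] ∈ F then 1 else 0

def sbxI (t : Int) : Int := PySem.List.pyGetD sbox_array t 0

def TgA (F : List (List Int)) (t : Int) : Int := Tg (gA (formatBits5 t)) F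

def cval (F : List (List Int)) (t : Int) : Int :=
  PySem.Int.bxor (TgA F t) (TgA F (sbxI t))

-- basic 0/1 xor algebra
theorem z01_bxor {a b : Int} (ha : Z01 a) (hb : Z01 b) : Z01 (PySem.Int.bxor a b) := by
  rcases ha with rfl | rfl <;> rcases hb with rfl | rfl <;> first | exact Or.inl (by decide) | exact Or.inr (by decide)

theorem bxor_zero_left {a : Int} (ha : Z01 a) : PySem.Int.bxor 0 a = a := by
  rcases ha with rfl | rfl <;> decide

theorem bxor_cancel01 {a b s : Int} (ha : Z01 a) (hb : Z01 b) (hs : Z01 s) :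
    PySem.Int.bxor (PySem.Int.bxor a s) (PySem.Int.bxor b s) = PySem.Int.bxor a b := by
  rcases ha with rfl | rfl <;> rcases hb with rfl | rfl <;> rcases hs with rfl | rfl <;> decide

theorem bxor_beq_one {a b : Int} (ha : Z01 a) (hb : Z01 b) :
    (PySem.Int.bxor a b == 1) = xor (a == 1) (b == 1) := by
  rcases ha with rfl | rfl <;> rcases hb with rfl | rfl <;> decide

theorem z01_ext {a b : Int} (ha : Z01 a) (hb : Z01 b) (h : (a == 1) = (b == 1)) : a = b := by
  rcases ha with rfl | rfl <;> rcases hb with rfl | rfl <;> first | rfl | simp at h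

theorem z01_Tg {g : List Int → Int} (hg : ∀ f, Z01 (g f)) :
    ∀ (F : List (List Int)) (a : Int), Z01 a →
      Z01 (F.foldl (fun acc f => PySem.Int.bxor acc (g f)) a)
  | [], _, ha => ha
  | f :: F, _, ha => z01_Tg hg F _ (z01_bxor ha (hg f))

theorem z01_Tg' {g : List Int → Int} (hg : ∀ f, Z01 (g f)) (F : List (List Int)) :
    Z01 (Tg g F) := z01_Tg hg F 0 (Or.inl rfl)

theorem foldl_bxor_extract {g : List Int → Int} (hg : ∀ f, Z01 (g f)) :
    ∀ (F : List (List Int)) (a : Int), Z01 a →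
      F.foldl (fun acc f => PySem.Int.bxor acc (g f)) a = PySem.Int.bxor a (Tg g F)
  | [], _, ha => by simp [Tg, PySem.Int.bxor_zero]
  | f :: F, a, ha => by
    have h1 := foldl_bxor_extract hg F (PySem.Int.bxor a (g f)) (z01_bxor ha (hg f))
    have h2 := foldl_bxor_extract hg F (PySem.Int.bxor 0 (g f)) (z01_bxor (Or.inl rfl) (hg f))
    simp only [List.foldl_cons, Tg] at *
    rw [h1, h2, bxor_zero_left (hg f)]
    rcases ha with rfl | rfl <;>
      rcases hg f with h3 | h3 <;>
      rcases z01_Tg hg F 0 (Or.inl rfl) with h4 | h4 <;>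
      rw [h3, h4] <;> decide

theorem Tg_cons {g : List Int → Int} (hg : ∀ f, Z01 (g f)) (f : List Int) (F : List (List Int)) :
    Tg g (f :: F) = PySem.Int.bxor (g f) (Tg g F) := by
  simp only [Tg, List.foldl_cons]
  rw [foldl_bxor_extract hg F _ (z01_bxor (Or.inl rfl) (hg f)), bxor_zero_left (hg f)]
  rfl

theorem z01_pyGetD {x : List Int} (hx : ∀ y ∈ x, Z01 y) (j : Int) :
    Z01 (PySem.List.pyGetD x j 0) := by
  unfold PySem.List.pyGetD
  cases h : PySem.List.pyGet? x j with
  | none => exact Or.inl rfl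
  | some y => exact hx y (PySem.List.mem_of_pyGet?_eq_some x h)

theorem foldl_band_zero : ∀ (l : List Int), (∀ y ∈ l, Z01 y) →
    l.foldl (fun r y => PySem.Int.band r y) 0 = 0
  | [], _ => rfl
  | y :: l, h => by
    have h0 : PySem.Int.band 0 y = 0 := by
      rcases h y (List.mem_cons_self) with rfl | rfl <;> decide
    simp only [List.foldl_cons, h0]
    exact foldl_band_zero l (fun z hz => h z (List.mem_cons_of_mem _ hz))

theorem foldl_band_one : ∀ (l : List Int), (∀ y ∈ l, Z01 y) →
    l.foldl (fun r y => PySem.Int.band r y) 1 = if ∀ y ∈ l, y = 1 then 1 else 0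
  | [], _ => by simp
  | y :: l, h => by
    have hl : ∀ z ∈ l, Z01 z := fun z hz => h z (List.mem_cons_of_mem _ hz)
    rcases h y (List.mem_cons_self) with rfl | rfl
    · have h0 : PySem.Int.band 1 (0:Int) = 0 := by decide
      simp only [List.foldl_cons, h0, foldl_band_zero l hl]
      rw [if_neg]; intro hall; exact absurd (hall 0 List.mem_cons_self) (by decide)
    · have h1 : PySem.Int.band 1 (1:Int) = 1 := by decide
      simp only [List.foldl_cons, h1, foldl_band_one l hl]
      by_cases hc : ∀ z ∈ l, z = 1
      · rw [if_pos hc, if_pos]; intro z hz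
        rcases List.mem_cons.mp hz with rfl | hz'; rfl; exact hc z hz'
      · rw [if_neg hc, if_neg]; intro hall
        exact hc.elim (fun z hz => hall z (List.mem_cons_of_mem _ hz))

-- the res list built inside calculate_power_u
theorem cpu_res (x f : List Int) :
    (PySem.List.enumerate f).foldl
      (fun res ix => if ix.2 ≠ 0 then res ++ [PySem.List.pyGetD x ix.1 0] else res) []
    = ((PySem.List.enumerate f).filter (fun ix : Int × Int => decide (ix.2 ≠ 0))).map
        (fun ix : Int × Int => PySem.List.pyGetD x ix.1 0) := by
  rw [PySem.List.foldl_append_ite (fun ix : Int × Int => ix.2 ≠ 0)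
    (fun ix : Int × Int => PySem.List.pyGetD x ix.1 0) (PySem.List.enumerate f) []]
  simp

theorem res_z01 {x : List Int} (hx : ∀ y ∈ x, Z01 y) (f : List Int) :
    ∀ y ∈ ((PySem.List.enumerate f).filter (fun ix : Int × Int => decide (ix.2 ≠ 0))).map
        (fun ix : Int × Int => PySem.List.pyGetD x ix.1 0), Z01 y := by
  intro y hy
  rcases List.mem_map.mp hy with ⟨ix, _, rfl⟩
  exact z01_pyGetD hx ix.1

theorem cpu_eq (x f : List Int) :
    calculate_power_u x f =
      (if ((PySem.List.enumerate f).filter (fun ix : Int × Int => decide (ix.2 ≠ 0))).map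
          (fun ix : Int × Int => PySem.List.pyGetD x ix.1 0) = [] then [0]
       else ((PySem.List.enumerate f).filter (fun ix : Int × Int => decide (ix.2 ≠ 0))).map
          (fun ix : Int × Int => PySem.List.pyGetD x ix.1 0)) := by
  unfold calculate_power_u
  rw [cpu_res]

theorem contribA_of_allzero (x : List Int) {f : List Int}
    (hf : f.any (fun c => decide (c ≠ 0)) = false) : contribA x f = 0 := by
  have hz : ∀ c ∈ f, c = 0 := by
    intro c hc
    have := List.any_eq_false.mp hf c hc
    simpa using this
  have hfil : (PySem.List.enumerate f).filter (fun ix : Int × Int => decide (ix.2 ≠ 0)) = [] := by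
    rw [List.filter_eq_nil_iff]
    intro ix hix
    rcases (PySem.List.mem_enumerate_iff f 0 ix).mp hix with ⟨k, hk, rfl⟩
    simp [hz _ (List.getElem_mem hk)]
  unfold contribA
  rw [cpu_eq, hfil]
  simp

theorem contribA_of_any {x f : List Int} (hx : ∀ y ∈ x, Z01 y)
    (hf : f.any (fun c => decide (c ≠ 0)) = true) :
    contribA x f =
      if ∀ y ∈ ((PySem.List.enumerate f).filter (fun ix : Int × Int => decide (ix.2 ≠ 0))).map
          (fun ix : Int × Int => PySem.List.pyGetD x ix.1 0), y = 1 then 1 else 0 := by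
  have hne : ((PySem.List.enumerate f).filter (fun ix : Int × Int => decide (ix.2 ≠ 0))).map
      (fun ix : Int × Int => PySem.List.pyGetD x ix.1 0) ≠ [] := by
    rcases List.any_eq_true.mp hf with ⟨c, hc, hc0⟩
    rcases List.getElem_of_mem hc with ⟨k, hk, rfl⟩
    have hmem : ((0:Int) + (k:Int), f[k]) ∈ PySem.List.enumerate f :=
      (PySem.List.mem_enumerate_iff f 0 _).mpr ⟨k, hk, rfl⟩
    have hmf : ((0:Int) + (k:Int), f[k]) ∈
        (PySem.List.enumerate f).filter (fun ix : Int × Int => decide (ix.2 ≠ 0)) := by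
      rw [List.mem_filter]; exact ⟨hmem, hc0⟩
    intro hmapnil
    rw [List.map_eq_nil_iff] at hmapnil
    rw [hmapnil] at hmf
    exact List.not_mem_nil hmf
  unfold contribA
  rw [cpu_eq, if_neg hne]
  exact foldl_band_one _ (res_z01 hx f)

theorem z01_contribA {x : List Int} (hx : ∀ y ∈ x, Z01 y) (f : List Int) :
    Z01 (contribA x f) := by
  cases hf : f.any (fun c => decide (c ≠ 0))
  · exact Or.inl (contribA_of_allzero x hf)
  · rw [contribA_of_any hx hf]
    by_cases h : ∀ y ∈ ((PySem.List.enumerate f).filter (fun ix : Int × Int => decide (ix.2 ≠ 0))).map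
        (fun ix : Int × Int => PySem.List.pyGetD x ix.1 0), y = 1
    · rw [if_pos h]; exact Or.inr rfl
    · rw [if_neg h]; exact Or.inl rfl

theorem z01_gA {x : List Int} (hx : ∀ y ∈ x, Z01 y) (f : List Int) : Z01 (gA x f) := by
  unfold gA; split
  · exact Or.inl rfl
  · exact z01_contribA hx f

theorem z01_flagF (F : List (List Int)) : Z01 (flagF F) := by
  unfold flagF; split
  · exact Or.inr rfl
  · exact Or.inl rfl

theorem z01_bits (n : Int) : ∀ y ∈ formatBits5 n, Z01 y := by
  unfold formatBits5
  intro y hy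
  have h2 : (0:Int) < 2 := by norm_num
  simp only [List.mem_cons, List.not_mem_nil, or_false] at hy
  have hz : ∀ a : Int, Z01 (PySem.Int.mod a 2) := by
    intro a
    have h1 := PySem.Int.mod_nonneg a h2
    have h2' := PySem.Int.mod_lt a h2
    unfold Z01; omega
  rcases hy with rfl | rfl | rfl | rfl | rfl <;> exact hz _

theorem z01_cval (F : List (List Int)) (t : Int) : Z01 (cval F t) :=
  z01_bxor (z01_Tg' (z01_gA (z01_bits t)) F) (z01_Tg' (z01_gA (z01_bits _)) F)

-- A's first helper loop: the (xor_result, xu) state after the fold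
theorem phase1 (x : List Int) :
    ∀ (F : List (List Int)) (fl : Int) (u : List (List Int)),
      F.foldl (fun (st : Int × List (List Int)) f =>
          if f = [0,0,0,0,0] then (1, st.2)
          else (st.1, st.2 ++ [calculate_power_u x f])) (fl, u)
      = ((if [0,0,0,0,0] ∈ F then 1 else fl),
         u ++ (F.filter (fun f => !(f == [0,0,0,0,0]))).map (calculate_power_u x))
  | [], fl, u => by simp
  | f :: F, fl, u => by
    by_cases h0 : f = [0,0,0,0,0]
    · subst h0
      rw [List.foldl_cons, if_pos rfl, phase1 x F 1 u]
      simp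
    · rw [List.foldl_cons, if_neg h0, phase1 x F fl (u ++ [calculate_power_u x f])]
      have : ([0,0,0,0,0] ∈ f :: F) ↔ ([0,0,0,0,0] ∈ F) := by
        constructor
        · intro h; rcases List.mem_cons.mp h with h | h
          · exact absurd h.symm h0
          · exact h
        · exact List.mem_cons_of_mem f
      simp [h0, this]

theorem foldl_skip (x : List Int) :
    ∀ (F : List (List Int)) (a : Int),
      (F.filter (fun f => !(f == [0,0,0,0,0]))).foldl
        (fun acc f => PySem.Int.bxor acc (contribA x f)) a
      = F.foldl (fun acc f => PySem.Int.bxor acc (gA x f)) a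
  | [], a => rfl
  | f :: F, a => by
    rw [List.filter_cons, List.foldl_cons]
    by_cases h0 : f = [0,0,0,0,0]
    · subst h0
      simp only [beq_self_eq_true, Bool.not_true, Bool.false_eq_true, if_false]
      rw [foldl_skip x F a,
        show gA x [0,0,0,0,0] = 0 from by simp [gA], PySem.Int.bxor_zero]
    · rw [if_pos (by simpa using h0), List.foldl_cons, foldl_skip x F _,
        show gA x f = contribA x f from by simp [gA, h0]]

theorem rowA_eq (x : List Int) (F : List (List Int)) :
    afnRowA F x = PySem.Int.bxor (Tg (gA x) F) (flagF F) := by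
  unfold afnRowA
  rw [phase1 x F 0 []]
  simp only [List.nil_append]
  rw [List.foldl_map]
  have : ∀ (l : List (List Int)) (a : Int),
      l.foldl (fun result f => PySem.Int.bxor result
        ((calculate_power_u x f).foldl (fun r y => PySem.Int.band r y) 1)) a
      = l.foldl (fun acc f => PySem.Int.bxor acc (contribA x f)) a := by
    intro l a; rfl
  rw [this, foldl_skip x F 0]
  rfl

-- A's sentinel loop, once the sentinel is replaced: it checks all remaining values
theorem loop_all (nrm sbx : List Int) :
    ∀ (xs : List Int) (last : Int), Z01 last →
      checkLoopA nrm sbx xs last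
        = xs.all (fun t => PySem.Int.bxor (PySem.List.pyGetD nrm t 0)
            (PySem.List.pyGetD sbx t 0) == last)
  | [], _, _ => rfl
  | t :: xs, last, hl => by
    rw [List.all_cons]
    show (if last = -1 then _ else if last ≠ _ then false else checkLoopA nrm sbx xs last) = _
    rw [if_neg (by rcases hl with rfl | rfl <;> decide)]
    by_cases he : last = PySem.Int.bxor (PySem.List.pyGetD nrm t 0) (PySem.List.pyGetD sbx t 0)
    · rw [if_neg (by simpa using he), loop_all nrm sbx xs last hl]
      simp [he.symm]
    · rw [if_pos (by simpa using he)]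
      have : (PySem.Int.bxor (PySem.List.pyGetD nrm t 0) (PySem.List.pyGetD sbx t 0) == last)
          = false := by simpa using fun h => he h.symm
      rw [this, Bool.false_and]

theorem loopA_run (nrm sbx : List Int)
    (hz : Z01 (PySem.Int.bxor (PySem.List.pyGetD nrm 0 0) (PySem.List.pyGetD sbx 0 0))) :
    checkLoopA nrm sbx (PySem.List.pyRange 0 32) (-1)
      = (PySem.List.pyRange 1 32).all
          (fun t => PySem.Int.bxor (PySem.List.pyGetD nrm t 0) (PySem.List.pyGetD sbx t 0)
            == PySem.Int.bxor (PySem.List.pyGetD nrm 0 0) (PySem.List.pyGetD sbx 0 0)) := by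
  rw [show PySem.List.pyRange 0 32 = (0:Int) :: PySem.List.pyRange 1 32 from
    PySem.List.pyRange_one_cons (by norm_num)]
  simp only [checkLoopA, if_true]
  exact loop_all nrm sbx _ _ hz

theorem lookup_map (f : Int → Int) {t : Int} (h0 : 0 ≤ t) (h32 : t < 32) :
    PySem.List.pyGetD ((PySem.List.pyRange 0 32).map f) t 0 = f t := by
  have hk : t = ((t.toNat : Nat) : Int) := (Int.toNat_of_nonneg h0).symm
  have h32' : t.toNat < 32 := by omega
  have h := PySem.List.pyGetD_map_pyRange f 32 t.toNat 0 h32'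
  rw [hk]
  simpa using h

theorem cvA_eq (F : List (List Int)) {t : Int} (h0 : 0 ≤ t) (h32 : t < 32) :
    PySem.Int.bxor
      (PySem.List.pyGetD ((PySem.List.pyRange 0 32).map
        (fun x_i => afnRowA F (formatBits5 x_i))) t 0)
      (PySem.List.pyGetD ((PySem.List.pyRange 0 32).map
        (fun x_i => afnRowA F (formatBits5 (PySem.List.pyGetD sbox_array x_i 0)))) t 0)
    = cval F t := by
  rw [lookup_map _ h0 h32, lookup_map _ h0 h32, rowA_eq, rowA_eq,
    bxor_cancel01 (z01_Tg' (z01_gA (z01_bits t)) F)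
      (z01_Tg' (z01_gA (z01_bits _)) F) (z01_flagF F)]
  rfl

theorem A_char (F : List (List Int)) :
    check_if_is_invariant F
      = (PySem.List.pyRange 1 32).all (fun t => cval F t == cval F 0) := by
  unfold check_if_is_invariant get_results_of_AFN get_results_of_AFN_input_sbox
  rw [PySem.List.foldl_append_singleton_eq_map, PySem.List.foldl_append_singleton_eq_map]
  simp only [List.nil_append]
  rw [loopA_run _ _ (by rw [cvA_eq F le_rfl (by norm_num)]; exact z01_cval F 0)]
  apply Bool.eq_iff_iff.mpr
  simp only [List.all_eq_true, beq_iff_eq]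
  constructor
  · intro h t ht
    have hb := (PySem.List.mem_pyRange_one).mp ht
    have := h t ht
    rwa [cvA_eq F (by omega) (by omega), cvA_eq F le_rfl (by norm_num)] at this
  · intro h t ht
    have hb := (PySem.List.mem_pyRange_one).mp ht
    rw [cvA_eq F (by omega) (by omega), cvA_eq F le_rfl (by norm_num)]
    exact h t ht

-- ===== B-side: bit-level characterisation of the truth table =====

def FULLN : Nat := 4294967295

set_option maxRecDepth 4096 in
theorem FULLB_cast : FULLB = (FULLN : Int) := by decide

theorem FULLN_bit (x : Nat) : FULLN.testBit x = decide (x < 32) := by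
  have h : FULLN = 2 ^ 32 - 1 := by norm_num [FULLN]
  rw [h, Nat.testBit_two_pow_sub_one]

theorem FULLN_lt : FULLN < 2 ^ 32 := by norm_num [FULLN]

def maskOf (j : Int) : Int := PySem.List.pyGetD bitmaskB j 0

set_option maxRecDepth 4096 in
theorem bitmaskB_eq :
    bitmaskB = [4294901760, 4278255360, 4042322160, 3435973836, 2863311530] := by decide

theorem maskOf_zero_or_mem (j : Int) : maskOf j = 0 ∨ maskOf j ∈ bitmaskB := by
  unfold maskOf PySem.List.pyGetD
  cases h : PySem.List.pyGet? bitmaskB j with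
  | none => exact Or.inl rfl
  | some y => exact Or.inr (PySem.List.mem_of_pyGet?_eq_some bitmaskB h)

set_option maxRecDepth 4096 in
theorem maskOf_nonneg (j : Int) : 0 ≤ maskOf j := by
  rcases maskOf_zero_or_mem j with h | h
  · rw [h]
  · rw [bitmaskB_eq] at h
    simp only [List.mem_cons, List.not_mem_nil, or_false] at h
    rcases h with h | h | h | h | h <;> rw [h] <;> norm_num

set_option maxRecDepth 8192 in
set_option maxHeartbeats 2000000 in
theorem maskOf_bit (j : Int) (hj : 0 ≤ j) (x : Nat) (hx : x < 32) :
    (maskOf j).toNat.testBit x = (PySem.List.pyGetD (formatBits5 (x:Int)) j 0 == 1) := by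
  have hjj : j = ((j.toNat : Nat) : Int) := (Int.toNat_of_nonneg hj).symm
  by_cases h5 : j.toNat < 5
  · have H : ∀ k : Nat, k < 5 → ∀ x : Nat, x < 32 →
        (PySem.List.pyGetD
            ([4294901760, 4278255360, 4042322160, 3435973836, 2863311530] : List Int)
            (k : Int) 0).toNat.testBit x
          = (PySem.List.pyGetD (formatBits5 (x:Int)) (k : Int) 0 == 1) := by decide
    have hmask : maskOf j = PySem.List.pyGetD
        ([4294901760, 4278255360, 4042322160, 3435973836, 2863311530] : List Int) j 0 := by
      unfold maskOf; rw [bitmaskB_eq]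
    rw [hmask, hjj]; exact H j.toNat h5 x hx
  · have hm : maskOf j = 0 := by
      unfold maskOf
      rw [hjj, PySem.List.pyGetD_natCast]
      exact List.getD_eq_default _ _ (by rw [bitmaskB_eq]; simp; omega)
    have hr : PySem.List.pyGetD (formatBits5 (x:Int)) j 0 = 0 := by
      rw [hjj, PySem.List.pyGetD_natCast]
      exact List.getD_eq_default _ _ (by unfold formatBits5; simp; omega)
    rw [hm, hr]
    simp

theorem maskFold_le : ∀ (js : List Int) (acc : Int), 0 ≤ acc →
    0 ≤ js.foldl (fun m j => PySem.Int.band m (PySem.List.pyGetD bitmaskB j 0)) acc ∧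
    (js.foldl (fun m j => PySem.Int.band m (PySem.List.pyGetD bitmaskB j 0)) acc).toNat ≤ acc.toNat
  | [], _, h => ⟨h, le_rfl⟩
  | j :: js, acc, h => by
    simp only [List.foldl_cons]
    have hb : PySem.Int.band acc (PySem.List.pyGetD bitmaskB j 0)
        = ((acc.toNat &&& (maskOf j).toNat : Nat) : Int) :=
      PySem.Int.band_of_nonneg h (maskOf_nonneg j)
    have h' := maskFold_le js (PySem.Int.band acc (PySem.List.pyGetD bitmaskB j 0))
      (by rw [hb]; positivity)
    refine ⟨h'.1, le_trans h'.2 ?_⟩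
    rw [hb, Int.toNat_natCast]
    exact Nat.and_le_left

theorem maskFold_bit (x : Nat) (hx : x < 32) : ∀ (js : List Int) (acc : Int), 0 ≤ acc →
    (∀ j ∈ js, 0 ≤ j) →
    (js.foldl (fun m j => PySem.Int.band m (PySem.List.pyGetD bitmaskB j 0)) acc).toNat.testBit x
      = (acc.toNat.testBit x
          && js.all (fun j => PySem.List.pyGetD (formatBits5 (x:Int)) j 0 == 1))
  | [], _, _, _ => by simp
  | j :: js, acc, ha, hjs => by
    simp only [List.foldl_cons, List.all_cons]
    have hb : PySem.Int.band acc (PySem.List.pyGetD bitmaskB j 0)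
        = ((acc.toNat &&& (maskOf j).toNat : Nat) : Int) :=
      PySem.Int.band_of_nonneg ha (maskOf_nonneg j)
    rw [maskFold_bit x hx js _ (by rw [hb]; positivity)
        (fun j' hj' => hjs j' (List.mem_cons_of_mem _ hj')),
      hb, Int.toNat_natCast, Nat.testBit_and,
      maskOf_bit j (hjs j List.mem_cons_self) x hx, Bool.and_assoc]

-- per-row Boolean contribution of B's table loop, and the parity of rows processed
def gBrow (x : Nat) (f : List Int) : Bool :=
  if f = [0,0,0,0,0] then true
  else if f.any (fun c => decide (c ≠ 0)) then contribA (formatBits5 (x:Int)) f == 1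
  else false

def bitF (F : List (List Int)) (x : Nat) : Bool := decide (F.countP (gBrow x) % 2 = 1)

def pz (F : List (List Int)) : Bool :=
  decide (F.countP (fun f => f == [0,0,0,0,0]) % 2 = 1)

theorem bitF_nil (x : Nat) : bitF [] x = false := by simp [bitF]

theorem bitF_cons (f : List Int) (F : List (List Int)) (x : Nat) :
    bitF (f :: F) x = xor (gBrow x f) (bitF F x) := by
  unfold bitF
  rw [List.countP_cons]
  rcases Nat.mod_two_eq_zero_or_one (F.countP (gBrow x)) with h | h <;>
    cases hg : gBrow x f <;> simp [Nat.add_mod, h]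

theorem idxs_nonneg (f : List Int) : ∀ j ∈ idxsOf f, 0 ≤ j := by
  intro j hj
  rcases List.mem_map.mp hj with ⟨jc, hjc, rfl⟩
  rcases (PySem.List.mem_enumerate_iff f 0 jc).mp (List.mem_filter.mp hjc).1 with ⟨k, hk, rfl⟩
  simp

theorem idxs_nil_iff (f : List Int) :
    idxsOf f = [] ↔ f.any (fun c => decide (c ≠ 0)) = false := by
  unfold idxsOf
  rw [List.map_eq_nil_iff, List.filter_eq_nil_iff]
  constructor
  · intro h
    rw [List.any_eq_false]
    intro c hc
    rcases List.getElem_of_mem hc with ⟨k, hk, rfl⟩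
    have hm : ((0:Int) + (k:Int), f[k]) ∈ PySem.List.enumerate f :=
      (PySem.List.mem_enumerate_iff f 0 _).mpr ⟨k, hk, rfl⟩
    have := h _ hm
    simpa using this
  · intro h jc hjc
    rcases (PySem.List.mem_enumerate_iff f 0 jc).mp hjc with ⟨k, hk, rfl⟩
    have := List.any_eq_false.mp h f[k] (List.getElem_mem hk)
    simpa using this

theorem idxs_all_eq (f : List Int) (x : Nat)
    (hany : f.any (fun c => decide (c ≠ 0)) = true) :
    (idxsOf f).all (fun j => PySem.List.pyGetD (formatBits5 (x:Int)) j 0 == 1)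
      = (contribA (formatBits5 (x:Int)) f == 1) := by
  rw [contribA_of_any (z01_bits (x:Int)) hany]
  unfold idxsOf
  rw [List.all_map]
  have hkey : ((PySem.List.enumerate f).filter (fun jc : Int × Int => decide (jc.2 ≠ 0))).all
      ((fun j => PySem.List.pyGetD (formatBits5 (x:Int)) j 0 == 1) ∘ Prod.fst)
      = decide (∀ y ∈ ((PySem.List.enumerate f).filter
          (fun ix : Int × Int => decide (ix.2 ≠ 0))).map
          (fun ix : Int × Int => PySem.List.pyGetD (formatBits5 (x:Int)) ix.1 0), y = 1) := by
    apply Bool.eq_iff_iff.mpr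
    simp only [List.all_eq_true, List.mem_map, decide_eq_true_eq, Function.comp, beq_iff_eq]
    constructor
    · rintro h y ⟨ix, hix, rfl⟩
      exact h ix hix
    · intro h ix hix
      exact h _ ⟨ix, hix, rfl⟩
  rw [hkey]
  by_cases h : ∀ y ∈ ((PySem.List.enumerate f).filter
      (fun ix : Int × Int => decide (ix.2 ≠ 0))).map
      (fun ix : Int × Int => PySem.List.pyGetD (formatBits5 (x:Int)) ix.1 0), y = 1
  · rw [if_pos h, decide_eq_true h]; rfl
  · rw [if_neg h, decide_eq_false h]; rfl

theorem table_aux : ∀ (F : List (List Int)) (acc : Int), 0 ≤ acc → acc.toNat < 2 ^ 32 →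
    0 ≤ F.foldl
        (fun table f =>
          if f = [0,0,0,0,0] then PySem.Int.bxor table FULLB
          else
            let idxs := idxsOf f
            if idxs ≠ [] then
              PySem.Int.bxor table
                (idxs.foldl (fun m j => PySem.Int.band m (PySem.List.pyGetD bitmaskB j 0)) FULLB)
            else table) acc ∧
    (F.foldl
        (fun table f =>
          if f = [0,0,0,0,0] then PySem.Int.bxor table FULLB
          else
            let idxs := idxsOf f
            if idxs ≠ [] then
              PySem.Int.bxor table
                (idxs.foldl (fun m j => PySem.Int.band m (PySem.List.pyGetD bitmaskB j 0)) FULLB)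
            else table) acc).toNat < 2 ^ 32 ∧
    ∀ x : Nat, x < 32 →
      (F.foldl
        (fun table f =>
          if f = [0,0,0,0,0] then PySem.Int.bxor table FULLB
          else
            let idxs := idxsOf f
            if idxs ≠ [] then
              PySem.Int.bxor table
                (idxs.foldl (fun m j => PySem.Int.band m (PySem.List.pyGetD bitmaskB j 0)) FULLB)
            else table) acc).toNat.testBit x
        = xor (acc.toNat.testBit x) (bitF F x)
  | [], acc, h1, h2 => ⟨h1, h2, fun x _ => by simp [bitF_nil]⟩
  | f :: F, acc, h1, h2 => by
    simp only [List.foldl_cons]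
    by_cases hz : f = [0,0,0,0,0]
    · rw [if_pos hz]
      have hacc' : PySem.Int.bxor acc FULLB = ((acc.toNat ^^^ FULLN : Nat) : Int) := by
        rw [FULLB_cast, PySem.Int.bxor_of_nonneg h1 (by positivity), Int.toNat_natCast]
      have hlt : acc.toNat ^^^ FULLN < 2 ^ 32 := by
        apply Nat.lt_pow_two_of_testBit
        intro jj hjj
        rw [Nat.testBit_xor,
          Nat.testBit_lt_two_pow (lt_of_lt_of_le h2 (Nat.pow_le_pow_right (by norm_num) hjj)),
          FULLN_bit]
        simp [Nat.not_lt.mpr hjj]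
      obtain ⟨r1, r2, r3⟩ := table_aux F (PySem.Int.bxor acc FULLB) (by rw [hacc']; positivity)
        (by rw [hacc', Int.toNat_natCast]; exact hlt)
      refine ⟨r1, r2, fun x hx => ?_⟩
      rw [r3 x hx, hacc', Int.toNat_natCast, Nat.testBit_xor, FULLN_bit, bitF_cons,
        show gBrow x f = true from by simp [gBrow, hz]]
      cases acc.toNat.testBit x <;> cases bitF F x <;> simp [hx]
    · rw [if_neg hz]
      by_cases hi : idxsOf f = []
      · rw [if_neg (not_not_intro hi)]
        obtain ⟨r1, r2, r3⟩ := table_aux F acc h1 h2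
        refine ⟨r1, r2, fun x hx => ?_⟩
        rw [r3 x hx, bitF_cons,
          show gBrow x f = false from by
            unfold gBrow; rw [if_neg hz, (idxs_nil_iff f).mp hi]; rfl]
        cases acc.toNat.testBit x <;> cases bitF F x <;> rfl
      · rw [if_pos hi]
        have hF0 : (0:Int) ≤ FULLB := by rw [FULLB_cast]; positivity
        obtain ⟨hm0, hmle⟩ := maskFold_le (idxsOf f) FULLB hF0
        have hmlt : ((idxsOf f).foldl
            (fun m j => PySem.Int.band m (PySem.List.pyGetD bitmaskB j 0)) FULLB).toNat
            < 2 ^ 32 := by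
          refine lt_of_le_of_lt (le_trans hmle ?_) FULLN_lt
          rw [FULLB_cast, Int.toNat_natCast]
        have hacc' : PySem.Int.bxor acc ((idxsOf f).foldl
            (fun m j => PySem.Int.band m (PySem.List.pyGetD bitmaskB j 0)) FULLB)
            = ((acc.toNat ^^^ ((idxsOf f).foldl
                (fun m j => PySem.Int.band m (PySem.List.pyGetD bitmaskB j 0)) FULLB).toNat
                : Nat) : Int) :=
          PySem.Int.bxor_of_nonneg h1 hm0
        have hlt : acc.toNat ^^^ ((idxsOf f).foldl
            (fun m j => PySem.Int.band m (PySem.List.pyGetD bitmaskB j 0)) FULLB).toNat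
            < 2 ^ 32 := by
          apply Nat.lt_pow_two_of_testBit
          intro jj hjj
          rw [Nat.testBit_xor,
            Nat.testBit_lt_two_pow (lt_of_lt_of_le h2 (Nat.pow_le_pow_right (by norm_num) hjj)),
            Nat.testBit_lt_two_pow (lt_of_lt_of_le hmlt (Nat.pow_le_pow_right (by norm_num) hjj))]
          rfl
        obtain ⟨r1, r2, r3⟩ := table_aux F
          (PySem.Int.bxor acc ((idxsOf f).foldl
            (fun m j => PySem.Int.band m (PySem.List.pyGetD bitmaskB j 0)) FULLB))
          (by rw [hacc']; positivity)
          (by rw [hacc', Int.toNat_natCast]; exact hlt)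
        refine ⟨r1, r2, fun x hx => ?_⟩
        have hany : f.any (fun c => decide (c ≠ 0)) = true := by
          cases hh : f.any (fun c => decide (c ≠ 0))
          · exact absurd ((idxs_nil_iff f).mpr hh) hi
          · rfl
        rw [r3 x hx, hacc', Int.toNat_natCast, Nat.testBit_xor, maskFold_bit x hx _ _ hF0
            (idxs_nonneg f),
          show FULLB.toNat.testBit x = true from by
            rw [FULLB_cast, Int.toNat_natCast, FULLN_bit]; simp [hx],
          Bool.true_and, idxs_all_eq f x hany, bitF_cons,
          show gBrow x f = (contribA (formatBits5 (x:Int)) f == 1) from by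
            unfold gBrow; rw [if_neg hz, hany]; rfl]
        cases acc.toNat.testBit x <;>
          cases contribA (formatBits5 (x:Int)) f == 1 <;>
          cases bitF F x <;> rfl

theorem table_char (F : List (List Int)) :
    0 ≤ tableB F ∧ (tableB F).toNat < 2 ^ 32 ∧
      ∀ x : Nat, x < 32 → (tableB F).toNat.testBit x = bitF F x := by
  obtain ⟨r1, r2, r3⟩ := table_aux F 0 le_rfl (by norm_num)
  refine ⟨r1, r2, fun x hx => ?_⟩
  have := r3 x hx
  rwa [Int.toNat_zero, Nat.zero_testBit, Bool.false_xor] at this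

-- the bit-by-bit sbox permutation loop
theorem perm_aux (t : Int) (ht : 0 ≤ t) : ∀ (l : List (Int × Int)) (acc : Int), 0 ≤ acc →
    (∀ p ∈ l, 0 ≤ p.1) →
    0 ≤ l.foldl (fun perm xsx =>
        PySem.Int.bor perm
          (Int.shiftLeft (PySem.Int.band (Int.shiftRight t xsx.2.toNat) 1) xsx.1.toNat)) acc ∧
    ∀ x : Nat,
      ((l.foldl (fun perm xsx =>
        PySem.Int.bor perm
          (Int.shiftLeft (PySem.Int.band (Int.shiftRight t xsx.2.toNat) 1) xsx.1.toNat)) acc).toNat).testBit x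
      = (acc.toNat.testBit x
          || l.any (fun p => decide ((x:Int) = p.1) && t.toNat.testBit p.2.toNat))
  | [], _, h, _ => ⟨h, fun x => by simp⟩
  | p :: l, acc, h, hl => by
    have hp1 : 0 ≤ p.1 := hl p List.mem_cons_self
    simp only [List.foldl_cons, List.any_cons]
    have hcast : Int.shiftLeft (PySem.Int.band (Int.shiftRight t p.2.toNat) 1) p.1.toNat
        = ((((t.toNat >>> p.2.toNat) &&& 1) <<< p.1.toNat : Nat) : Int) := by
      conv_lhs => rw [← Int.toNat_of_nonneg ht]
      rw [show Int.shiftRight ((t.toNat : Nat) : Int) p.2.toNat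
            = ((t.toNat >>> p.2.toNat : Nat) : Int) from rfl,
        show (1:Int) = ((1:Nat):Int) from rfl, PySem.Int.band_natCast]
      rfl
    have hc0 : (0:Int)
        ≤ Int.shiftLeft (PySem.Int.band (Int.shiftRight t p.2.toNat) 1) p.1.toNat := by
      rw [hcast]; positivity
    have hacc' : PySem.Int.bor acc
          (Int.shiftLeft (PySem.Int.band (Int.shiftRight t p.2.toNat) 1) p.1.toNat)
        = ((acc.toNat ||| (((t.toNat >>> p.2.toNat) &&& 1) <<< p.1.toNat) : Nat) : Int) := by
      rw [PySem.Int.bor_of_nonneg h hc0, hcast, Int.toNat_natCast]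
    obtain ⟨r1, r2⟩ := perm_aux t ht l
      (PySem.Int.bor acc
        (Int.shiftLeft (PySem.Int.band (Int.shiftRight t p.2.toNat) 1) p.1.toNat))
      (by rw [hacc']; positivity) (fun q hq => hl q (List.mem_cons_of_mem _ hq))
    refine ⟨r1, fun x => ?_⟩
    rw [r2 x, hacc', Int.toNat_natCast, Nat.testBit_or]
    have hbit : (((t.toNat >>> p.2.toNat) &&& 1) <<< p.1.toNat).testBit x
        = (decide ((x:Int) = p.1) && t.toNat.testBit p.2.toNat) := by
      rw [Nat.testBit_shiftLeft, Nat.testBit_and, Nat.testBit_shiftRight,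
        show (1:Nat) = 2 ^ 1 - 1 from rfl, Nat.testBit_two_pow_sub_one]
      by_cases hxe : x = p.1.toNat
      · have hxj : (x:Int) = p.1 := by omega
        subst hxe
        simp [Int.toNat_of_nonneg hp1]
      · have hxj : ¬ ((x:Int) = p.1) := by omega
        by_cases hle : p.1.toNat ≤ x
        · have h1 : ¬ (x - p.1.toNat < 1) := by omega
          simp [h1, hxj]
        · simp [hle, hxj]
    rw [hbit]
    cases acc.toNat.testBit x <;>
      cases decide ((x:Int) = p.1) && t.toNat.testBit p.2.toNat <;>
      cases l.any (fun p => decide ((x:Int) = p.1) && t.toNat.testBit p.2.toNat) <;> rfl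

theorem sbox_lookup (x : Nat) (hx : x < 32) :
    PySem.List.pyGetD sbox_array (x:Int) 0 = sbox_array[x]'(by rw [show sbox_array.length = 32 from rfl]; omega) := by
  rw [PySem.List.pyGetD_natCast]
  exact List.getD_eq_getElem _ _ (by rw [show sbox_array.length = 32 from rfl]; omega)

theorem perm_char (t : Int) (ht : 0 ≤ t) :
    0 ≤ permB t ∧ ∀ x : Nat, (permB t).toNat.testBit x
      = (decide (x < 32) && t.toNat.testBit (PySem.List.pyGetD sbox_array (x:Int) 0).toNat) := by
  unfold permB
  have hl : ∀ p ∈ PySem.List.enumerate sbox_array, (0:Int) ≤ p.1 := by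
    intro p hp
    rcases (PySem.List.mem_enumerate_iff sbox_array 0 p).mp hp with ⟨k, hk, rfl⟩
    simp
  obtain ⟨r1, r2⟩ := perm_aux t ht (PySem.List.enumerate sbox_array) 0 le_rfl hl
  refine ⟨r1, fun x => ?_⟩
  rw [r2 x, Int.toNat_zero, Nat.zero_testBit, Bool.false_or]
  apply Bool.eq_iff_iff.mpr
  simp only [List.any_eq_true, Bool.and_eq_true, decide_eq_true_eq]
  constructor
  · rintro ⟨p, hp, hpx, hbit⟩
    rcases (PySem.List.mem_enumerate_iff sbox_array 0 p).mp hp with ⟨k, hk, rfl⟩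
    have hk32 : k < 32 := by
      rw [show sbox_array.length = 32 from rfl] at hk
      exact hk
    have hxk : x = k := by
      simp only [zero_add] at hpx
      exact_mod_cast hpx
    subst hxk
    refine ⟨hk32, ?_⟩
    rwa [sbox_lookup x hk32]
  · rintro ⟨hx32, hbit⟩
    refine ⟨((0:Int) + (x:Int), sbox_array[x]'(by rw [show sbox_array.length = 32 from rfl]; omega)),
      (PySem.List.mem_enumerate_iff sbox_array 0 _).mpr
        ⟨x, by rw [show sbox_array.length = 32 from rfl]; omega, rfl⟩, by simp, ?_⟩
    rwa [sbox_lookup x hx32] at hbit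

theorem bitF_eq : ∀ (F : List (List Int)) (x : Nat),
    bitF F x = xor (TgA F (x:Int) == 1) (pz F)
  | [], x => by simp [bitF, TgA, Tg, pz]
  | f :: F, x => by
    rw [bitF_cons, bitF_eq F x]
    unfold TgA
    have hT : Tg (gA (formatBits5 (x:Int))) (f :: F)
        = PySem.Int.bxor (gA (formatBits5 (x:Int)) f) (Tg (gA (formatBits5 (x:Int))) F) :=
      Tg_cons (z01_gA (z01_bits (x:Int))) f F
    by_cases hz : f = [0,0,0,0,0]
    · have hga : gA (formatBits5 (x:Int)) f = 0 := by simp [gA, hz]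
      have hpz : pz (f :: F) = !(pz F) := by
        unfold pz
        rw [List.countP_cons]
        rcases Nat.mod_two_eq_zero_or_one (F.countP (fun f => f == [0,0,0,0,0])) with h | h <;>
          simp [hz, h, Nat.add_mod]
      rw [hT, hga, bxor_zero_left (z01_Tg' (z01_gA (z01_bits (x:Int))) F), hpz,
        show gBrow x f = true from by simp [gBrow, hz]]
      cases Tg (gA (formatBits5 (x:Int))) F == 1 <;> cases pz F <;> rfl
    · have hpz : pz (f :: F) = pz F := by
        unfold pz
        rw [List.countP_cons]
        simp [hz]
      rw [hT, hpz, bxor_beq_one (z01_gA (z01_bits (x:Int)) f)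
        (z01_Tg' (z01_gA (z01_bits (x:Int))) F)]
      cases hany : f.any (fun c => decide (c ≠ 0))
      · rw [show gBrow x f = false from by
            unfold gBrow; rw [if_neg hz, hany]; rfl,
          show (gA (formatBits5 (x:Int)) f == 1) = false from by
            simp [gA, hz, contribA_of_allzero _ hany]]
        cases Tg (gA (formatBits5 (x:Int))) F == 1 <;> cases pz F <;> rfl
      · rw [show gBrow x f = (contribA (formatBits5 (x:Int)) f == 1) from by
            unfold gBrow; rw [if_neg hz, hany]; rfl,
          show gA (formatBits5 (x:Int)) f = contribA (formatBits5 (x:Int)) f from by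
            simp [gA, hz]]
        cases contribA (formatBits5 (x:Int)) f == 1 <;>
          cases Tg (gA (formatBits5 (x:Int))) F == 1 <;> cases pz F <;> rfl

theorem check_eq (F : List (List Int)) :
    check_if_is_invariant F = check_if_is_invariant_alt F := by
  obtain ⟨ht0, htlt, htbit⟩ := table_char F
  obtain ⟨hp0, hpbit⟩ := perm_char (tableB F) ht0
  have hsb : ∀ x : Nat, x < 32 → 0 ≤ PySem.List.pyGetD sbox_array (x:Int) 0 ∧
      (PySem.List.pyGetD sbox_array (x:Int) 0).toNat < 32 := by decide
  have hdiff : PySem.Int.bxor (tableB F) (permB (tableB F))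
      = ((((tableB F).toNat ^^^ (permB (tableB F)).toNat : Nat)) : Int) :=
    PySem.Int.bxor_of_nonneg ht0 hp0
  have hdbit : ∀ x : Nat, x < 32 →
      ((tableB F).toNat ^^^ (permB (tableB F)).toNat).testBit x = (cval F (x:Int) == 1) := by
    intro x hx
    rw [Nat.testBit_xor, htbit x hx, hpbit x, decide_eq_true hx, Bool.true_and,
      htbit _ (hsb x hx).2, bitF_eq, bitF_eq, Int.toNat_of_nonneg (hsb x hx).1]
    unfold cval sbxI TgA
    rw [bxor_beq_one (z01_Tg' (z01_gA (z01_bits (x:Int))) F)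
      (z01_Tg' (z01_gA (z01_bits _)) F)]
    cases Tg (gA (formatBits5 (x:Int))) F == 1 <;>
      cases Tg (gA (formatBits5 (PySem.List.pyGetD sbox_array (x:Int) 0))) F == 1 <;>
      cases pz F <;> rfl
  have hdge : ∀ y : Nat, 32 ≤ y →
      ((tableB F).toNat ^^^ (permB (tableB F)).toNat).testBit y = false := by
    intro y hy
    rw [Nat.testBit_xor, hpbit y,
      Nat.testBit_lt_two_pow (lt_of_lt_of_le htlt (Nat.pow_le_pow_right (by norm_num) hy))]
    simp [Nat.not_lt.mpr hy]
  rw [A_char]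
  show _ = decide (PySem.Int.bxor (tableB F) (permB (tableB F)) = 0 ∨
      PySem.Int.bxor (tableB F) (permB (tableB F)) = FULLB)
  rw [hdiff, FULLB_cast]
  apply Bool.eq_iff_iff.mpr
  simp only [List.all_eq_true, beq_iff_eq, decide_eq_true_eq, Nat.cast_eq_zero, Nat.cast_inj]
  constructor
  · intro h
    have key : ∀ x : Nat, x < 32 → (cval F (x:Int) == 1) = (cval F 0 == 1) := by
      intro x hx
      rcases Nat.eq_zero_or_pos x with rfl | hpos
      · norm_num
      · have hmem : (x:Int) ∈ PySem.List.pyRange 1 32 := by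
          rw [PySem.List.mem_pyRange_one]
          constructor
          · exact_mod_cast hpos
          · exact_mod_cast hx
        rw [h (x:Int) hmem]
    cases h0 : (cval F 0 == 1)
    · left
      apply Nat.eq_of_testBit_eq
      intro y
      rw [Nat.zero_testBit]
      rcases lt_or_ge y 32 with hy | hy
      · rw [hdbit y hy, key y hy, h0]
      · exact hdge y hy
    · right
      apply Nat.eq_of_testBit_eq
      intro y
      rw [FULLN_bit]
      rcases lt_or_ge y 32 with hy | hy
      · rw [hdbit y hy, key y hy, h0]
        simp [hy]
      · rw [hdge y hy]
        simp [Nat.not_lt.mpr hy]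
  · intro h t ht
    have hb := (PySem.List.mem_pyRange_one).mp ht
    have ht0' : t = ((t.toNat : Nat) : Int) := (Int.toNat_of_nonneg (by omega)).symm
    have hlt32 : t.toNat < 32 := by omega
    have h0bit : ((tableB F).toNat ^^^ (permB (tableB F)).toNat).testBit 0
        = (cval F 0 == 1) := by
      have := hdbit 0 (by norm_num)
      simpa using this
    have hv : ∀ x : Nat, x < 32 → (cval F (x:Int) == 1) = (cval F 0 == 1) := by
      rcases h with h | h <;> intro x hx <;> rw [← hdbit x hx, ← h0bit, h]
      · simp
      · rw [FULLN_bit, FULLN_bit]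
        simp [hx]
    exact z01_ext (z01_cval F t) (z01_cval F 0) (by rw [ht0']; exact hv t.toNat hlt32)

-- ===== VERDICT (by name: the statement is the Claim_ definition above) =====
theorem check_if_is_invariant_spec : Claim_equal_check_if_is_invariant := by
  intro F _hDom _hPre
  show check_if_is_invariant F = check_if_is_invariant_alt F
  exact check_eq F
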